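-- pv_equiv track=rewrite | github.com/DivyaJyotiDas/Hackerrank | delete_chart.py | removed_character
-- ===== SOURCE A (Python) =====
-- def removed_character(f_name):
--
--     x_count = 0
--     del_count = 0
--     for i in f_name:
--         if i == 'x':
--             x_count += 1
--         else:
--             x_count = 0
--         if x_count >= 3:
--             del_count += 1
--
--     return del_count
-- ===== SOURCE B (Python) =====
-- def removed_character(f_name):
--     total = 0
--     i = 0
--     n = len(f_name)
--     while i < n:
--         if f_name[i] == 'x':
--             j = i
--             while j < n and f_name[j] == 'x':
--                 j += 1
--             total += max(0, j - i - 2)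
--             i = j
--         else:
--             i += 1
--     return total
-- ===== Notes on version B (the rewrite author's own statement) =====
-- stated objective: alternative
-- what changed: Replaces the per-character running counter with a per-step threshold test by a run-scanning pass: each maximal run of the counted letter is measured at once and contributes max(0, length minus 2) in closed form.
import Mathlib
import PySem

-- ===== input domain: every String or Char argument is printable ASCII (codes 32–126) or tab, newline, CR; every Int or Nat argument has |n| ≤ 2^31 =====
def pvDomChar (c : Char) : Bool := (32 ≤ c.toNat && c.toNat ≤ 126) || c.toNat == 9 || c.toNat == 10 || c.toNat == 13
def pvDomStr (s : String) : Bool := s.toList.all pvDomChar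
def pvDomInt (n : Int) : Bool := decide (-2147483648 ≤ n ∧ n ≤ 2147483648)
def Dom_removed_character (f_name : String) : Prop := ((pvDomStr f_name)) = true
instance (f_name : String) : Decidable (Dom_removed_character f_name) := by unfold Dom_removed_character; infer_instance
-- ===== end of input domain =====

-- B scans each maximal run of 'x' at once and adds max(0, len-2) in closed form,
-- instead of A's per-character counter with a per-step >=3 test. Alternative decomposition, same cost.

-- ===== PORT A =====
-- A: fold over the characters with state (x_count, del_count)
def removed_character (f_name : String) : Int :=
  (f_name.toList.foldl
    (fun (st : Int × Int) (i : Char) =>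
      let x_count := if i = 'x' then st.1 + 1 else 0
      let del_count := if x_count ≥ 3 then st.2 + 1 else st.2
      (x_count, del_count))
    (0, 0)).2

-- ===== PORT B =====
-- B: on an 'x', consume the whole run (takeWhile/dropWhile = the inner while loop) and add max(0, run-2)
def removed_character_altGo : List Char → Int
  | [] => 0
  | c :: rest =>
    if c = 'x' then
      let run := rest.takeWhile (fun d => d = 'x')
      max 0 ((run.length : Int) + 1 - 2) + removed_character_altGo (rest.dropWhile (fun d => d = 'x'))
    else
      removed_character_altGo rest
termination_by l => l.length
decreasing_by
  · exact Nat.lt_succ_of_le (List.length_dropWhile_le _ _)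
  · exact Nat.lt_succ_self _

def removed_character_alt (f_name : String) : Int :=
  removed_character_altGo f_name.toList

-- ===== PRECONDITION & SPEC =====
def Spec_removed_character (f_name : String) (out : Int) : Prop := out = removed_character_alt f_name
instance (f_name : String) (out : Int) : Decidable (Spec_removed_character f_name out) := by unfold Spec_removed_character; infer_instance

-- ===== CLAIM (what is proved, stated in full; the proofs are below) =====
def Claim_equal_removed_character : Prop := ∀ (f_name : String), Dom_removed_character f_name → Spec_removed_character f_name (removed_character f_name)

-- ===== LEMMAS AND PROOFS =====

-- A's contribution function with the running counter made explicit
def pvG : List Char → Int → Int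
  | [], _ => 0
  | c :: rest, xc =>
    if c = 'x' then (if xc + 1 ≥ 3 then 1 else 0) + pvG rest (xc + 1)
    else pvG rest 0

theorem pvFold_eq_pvG (l : List Char) (xc dc : Int) :
    (l.foldl
      (fun (st : Int × Int) (i : Char) =>
        let x_count := if i = 'x' then st.1 + 1 else 0
        let del_count := if x_count ≥ 3 then st.2 + 1 else st.2
        (x_count, del_count))
      (xc, dc)).2 = dc + pvG l xc := by
  induction l generalizing xc dc with
  | nil => simp [pvG]
  | cons c rest ih =>
    simp only [List.foldl_cons]
    by_cases hc : c = 'x'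
    · subst hc
      by_cases h3 : (3 : Int) ≤ xc + 1 <;>
        simp only [pvG, ge_iff_le, h3, if_true, if_false, ih] <;> ring
    · simp [pvG, hc, ih]

-- the run lemma: pvG over an all-'x' prefix t followed by d (empty or not starting with 'x')
theorem pvG_run (t d : List Char) (ht : ∀ c ∈ t, c = 'x')
    (hd : d = [] ∨ ∃ c d', d = c :: d' ∧ c ≠ 'x') (xc : Int) (hxc : 0 ≤ xc) :
    pvG (t ++ d) xc = max 0 (xc + t.length - 2) - max 0 (xc - 2) + pvG d 0 := by
  induction t generalizing xc with
  | nil =>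
    simp only [List.nil_append, List.length_nil]
    have hde : pvG d xc = pvG d 0 := by
      rcases hd with h | ⟨c, d', rfl, hc⟩
      · subst h; rfl
      · simp [pvG, hc]
    rw [hde]; omega
  | cons c t' ih =>
    have hc : c = 'x' := ht c (by simp)
    subst hc
    have ht' : ∀ c ∈ t', c = 'x' := fun c hc => ht c (by simp [hc])
    simp only [List.cons_append, pvG, if_true, List.length_cons]
    rw [ih ht' (xc + 1) (by omega)]
    split_ifs with h <;> push_cast <;> omega

theorem pvG_eq_altGo_bounded : ∀ (n : Nat) (l : List Char), l.length ≤ n →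
    pvG l 0 = removed_character_altGo l := by
  intro n
  induction n with
  | zero =>
    intro l hl
    have : l = [] := List.eq_nil_of_length_eq_zero (Nat.le_zero.mp hl)
    subst this; simp [pvG, removed_character_altGo]
  | succ n ih =>
    intro l hl
    cases l with
    | nil => simp [pvG, removed_character_altGo]
    | cons c rest =>
      by_cases hc : c = 'x'
      · subst hc
        have hsplit : rest.takeWhile (fun d => d = 'x') ++ rest.dropWhile (fun d => d = 'x')
            = rest := List.takeWhile_append_dropWhile
        have ht : ∀ d ∈ rest.takeWhile (fun d => d = 'x'), d = 'x' := by
          intro d hd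
          simpa using List.mem_takeWhile_imp hd
        have hd : rest.dropWhile (fun d => d = 'x') = [] ∨
            ∃ c d', rest.dropWhile (fun d => d = 'x') = c :: d' ∧ c ≠ 'x' := by
          cases hdw : rest.dropWhile (fun d => d = 'x') with
          | nil => exact Or.inl rfl
          | cons a as =>
            refine Or.inr ⟨a, as, rfl, ?_⟩
            have hh := List.head?_dropWhile_not (fun d => decide (d = 'x')) rest
            rw [hdw] at hh
            simpa using hh
        have hdrop : (rest.dropWhile (fun d => d = 'x')).length ≤ n := by
          have h1 := List.length_dropWhile_le (fun d => decide (d = 'x')) rest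
          simp only [List.length_cons] at hl
          omega
        simp only [pvG, if_true, ge_iff_le, show ¬((3:Int) ≤ 0 + 1) by omega, if_false]
        conv_lhs => rw [← hsplit]
        rw [pvG_run _ _ ht hd (0 + 1) (by omega)]
        rw [ih _ hdrop]
        rw [show removed_character_altGo ('x' :: rest)
              = max 0 (((rest.takeWhile (fun d => d = 'x')).length : Int) + 1 - 2)
                + removed_character_altGo (rest.dropWhile (fun d => d = 'x')) from by
            rw [removed_character_altGo]; simp]
        have hnn : (0 : Int) ≤ ((rest.takeWhile (fun d => d = 'x')).length : Int) := by
          positivity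
        omega
      · have hrest : rest.length ≤ n := by
          simp only [List.length_cons] at hl; omega
        simp [pvG, removed_character_altGo, hc, ih rest hrest]

-- ===== VERDICT (by name: the statement is the Claim_ definition above) =====
theorem removed_character_spec : Claim_equal_removed_character := by
  intro f_name _
  unfold Spec_removed_character removed_character removed_character_alt
  rw [pvFold_eq_pvG, pvG_eq_altGo_bounded f_name.toList.length f_name.toList le_rfl]
  ring
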